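-- pv_equiv track=rewrite | github.com/ImAKappa/aoc2022 | day01/day01.py | part2
-- ===== SOURCE A (Python) =====
-- def part2(day_in: str) -> int:
--     """Find sum of calories of top three Elves"""
--     elves = list()
--     for elf in day_in.split("\n\n"):
--         total_calories = sum(int(calorie) for calorie in elf.split("\n") if calorie.isdigit())
--         elves.append(total_calories)
--         elves = sorted(elves, reverse=True)
--         while len(elves) > 3:
--             elves.pop()
--     return sum(elves)
-- ===== SOURCE B (Python) =====
-- def part2(day_in: str) -> int:
--     """Find sum of calories of top three Elves"""
--     totals = [
--         sum(int(calorie) for calorie in elf.split("\n") if calorie.isdigit())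
--         for elf in day_in.split("\n\n")
--     ]
--     return sum(sorted(totals, reverse=True)[:3])
-- ===== Notes on version B (the rewrite author's own statement) =====
-- stated objective: simpler
-- what changed: B accumulates all per-Elf totals in one pass and selects the top three once at the end (sorted(totals, reverse=True)[:3]), removing A's per-iteration re-sort and while-pop trimming of the running list.
import Mathlib
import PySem

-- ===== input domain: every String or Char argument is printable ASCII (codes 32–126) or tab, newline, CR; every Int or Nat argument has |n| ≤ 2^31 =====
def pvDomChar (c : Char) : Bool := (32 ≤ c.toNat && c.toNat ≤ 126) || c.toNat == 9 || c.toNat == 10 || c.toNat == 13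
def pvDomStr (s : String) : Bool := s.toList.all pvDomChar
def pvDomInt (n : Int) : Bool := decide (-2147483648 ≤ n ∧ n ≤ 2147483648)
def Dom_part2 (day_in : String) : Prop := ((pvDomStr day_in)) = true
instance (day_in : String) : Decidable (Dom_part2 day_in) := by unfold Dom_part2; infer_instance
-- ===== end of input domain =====

-- B removes A's per-iteration re-sort and while-pop trimming: it collects all per-Elf
-- totals first and selects the three largest once at the end (objective: simpler).

-- ===== PORT A =====

-- sum(int(calorie) for calorie in elf.split("\n") if calorie.isdigit())
-- (identical expression in A and in B; int() cannot fail on an isdigit string, ported as getD 0)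
def pvElfTotal (elf : String) : Int :=
  (((PySem.Str.split? elf "\n").getD []).filter (fun c => PySem.Str.strIsdigit c)).foldl
    (fun acc c => acc + (PySem.Int.ofStr? c).getD 0) 0

-- while len(elves) > 3: elves.pop()
def pvTrim3 (l : List Int) : List Int :=
  if h : 3 < l.length then pvTrim3 l.dropLast else l
  termination_by l.length
  decreasing_by simp [List.length_dropLast]; omega

def part2 (day_in : String) : Int :=
  (((PySem.Str.split? day_in "\n\n").getD []).foldl
    (fun elves elf =>
      pvTrim3 (PySem.List.sorted (elves ++ [pvElfTotal elf]) (fun x => x) true))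
    []).foldl (· + ·) 0

-- ===== PORT B =====
def part2_alt (day_in : String) : Int :=
  ((PySem.List.sorted (((PySem.Str.split? day_in "\n\n").getD []).map pvElfTotal)
      (fun x => x) true).take 3).foldl (· + ·) 0

-- ===== PRECONDITION & SPEC =====
def Spec_part2 (day_in : String) (out : Int) : Prop := out = part2_alt day_in
instance (day_in : String) (out : Int) : Decidable (Spec_part2 day_in out) := by unfold Spec_part2; infer_instance

-- ===== CLAIM (what is proved, stated in full; the proofs are below) =====
def Claim_equal_part2 : Prop := ∀ (day_in : String), Dom_part2 day_in → Spec_part2 day_in (part2 day_in)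

-- ===== LEMMAS AND PROOFS =====

-- trimming by repeated pop of the last element is take 3
theorem pvTrim3_eq_take (l : List Int) : pvTrim3 l = l.take 3 := by
  induction l using pvTrim3.induct with
  | case1 l h ih =>
      rw [pvTrim3, dif_pos h, ih, List.dropLast_eq_take, List.take_take]
      congr 1; omega
  | case2 l h =>
      rw [pvTrim3, dif_neg h, List.take_of_length_le]; omega

-- descending sort, id key
def sd (l : List Int) : List Int := PySem.List.sorted l (fun x => x) true

-- stable descending insertion of a LAST element
def insD (x : Int) : List Int → List Int
  | [] => [x]
  | a :: s => if x ≤ a then a :: insD x s else x :: a :: s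

theorem insD_perm (x : Int) (s : List Int) : (insD x s).Perm (s ++ [x]) := by
  induction s with
  | nil => simp [insD]
  | cons a s ih =>
      simp only [insD]
      split
      · exact (ih.cons a)
      · exact (List.perm_append_singleton x (a :: s)).symm

theorem insD_mem (x y : Int) (s : List Int) (h : y ∈ insD x s) : y = x ∨ y ∈ s := by
  induction s with
  | nil => simp [insD] at h; simp [h]
  | cons a s ih =>
      simp only [insD] at h
      split at h
      · rcases List.mem_cons.1 h with h | h
        · exact Or.inr (by simp [h])
        · rcases ih h with h | h
          · exact Or.inl h
          · exact Or.inr (List.mem_cons_of_mem _ h)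
      · simpa [List.mem_cons, or_assoc] using h

theorem insD_pairwise (x : Int) (s : List Int)
    (h : s.Pairwise (fun a b => b ≤ a)) : (insD x s).Pairwise (fun a b => b ≤ a) := by
  induction s with
  | nil => simp [insD]
  | cons a s ih =>
      rcases List.pairwise_cons.1 h with ⟨ha, hs⟩
      simp only [insD]
      split
      · rename_i hxa
        refine List.pairwise_cons.2 ⟨?_, ih hs⟩
        intro y hy
        rcases insD_mem x y s hy with rfl | hy
        · exact hxa
        · exact ha y hy
      · rename_i hxa
        refine List.pairwise_cons.2 ⟨?_, h⟩
        intro y hy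
        rcases List.mem_cons.1 hy with rfl | hy
        · omega
        · exact le_trans (ha y hy) (by omega)

theorem sd_pairwise (l : List Int) : (sd l).Pairwise (fun a b => b ≤ a) := by
  simpa using PySem.List.sorted_pairwise_rev l (fun x => x)

-- two permutation-equal descending-sorted Int lists are equal
theorem sd_unique (l s : List Int) (hp : s.Perm l)
    (hs : s.Pairwise (fun a b => b ≤ a)) : sd l = s := by
  refine List.eq_of_perm_of_sorted ?_ (sd_pairwise l) hs
    (((PySem.List.sorted_perm l (fun x => x) true).trans hp.symm))
  intro a b _ _ h1 h2
  omega

theorem sd_append_singleton (s : List Int) (x : Int)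
    (h : s.Pairwise (fun a b => b ≤ a)) : sd (s ++ [x]) = insD x s := by
  exact sd_unique _ _ (insD_perm x s) (insD_pairwise x s h)

-- take k of an insertion only looks at the first k elements
theorem take_insD (k : Nat) (x : Int) (s : List Int) :
    (insD x s).take k = (insD x (s.take k)).take k := by
  induction s generalizing k with
  | nil => simp
  | cons a s ih =>
      cases k with
      | zero => simp
      | succ j =>
          simp only [List.take_succ_cons, insD]
          split
          · simp only [List.take_succ_cons, ih j]
          · cases j with
            | zero => simp
            | succ i => simp [List.take_succ_cons, List.take_take]

theorem main_fold (ts : List Int) :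
    ts.foldl (fun acc t => pvTrim3 (PySem.List.sorted (acc ++ [t]) (fun x => x) true)) []
      = (sd ts).take 3 := by
  induction ts using List.reverseRecOn with
  | nil => simp [sd, PySem.List.sorted]
  | append_singleton L x ih =>
      rw [List.foldl_append, List.foldl_cons, List.foldl_nil, ih, pvTrim3_eq_take]
      have h1 : PySem.List.sorted ((sd L).take 3 ++ [x]) (fun x => x) true
          = insD x ((sd L).take 3) :=
        sd_append_singleton _ x ((sd_pairwise L).sublist (List.take_sublist 3 (sd L)))
      have h2 : sd (L ++ [x]) = insD x (sd L) :=
        sd_unique _ _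
          ((insD_perm x (sd L)).trans
            ((PySem.List.sorted_perm L (fun x => x) true).append (List.Perm.refl [x])))
          (insD_pairwise x (sd L) (sd_pairwise L))
      rw [h1, h2, take_insD 3 x (sd L)]

-- ===== VERDICT (by name: the statement is the Claim_ definition above) =====
theorem part2_spec : Claim_equal_part2 := by
  intro day_in _
  unfold Spec_part2 part2 part2_alt
  rw [← List.foldl_map (f := pvElfTotal)
        (g := fun acc t => pvTrim3 (PySem.List.sorted (acc ++ [t]) (fun x => x) true)),
      main_fold]
  rfl
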